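-- pv_equiv track=rewrite | github.com/tonyfresher/graph-algo | assignment_problem/main.py | _reduce_matrix_columns
-- ===== SOURCE A (Python) =====
-- from copy import deepcopy
--
-- def _reduce_matrix_columns(matrix):
--     modified = deepcopy(matrix)
--
--     m_len, n_len = len(matrix), len(matrix[0])
--
--     for n in range(n_len):
--         min_val = min([row[n] for row in modified])
--
--         for m in range(m_len):
--             modified[m][n] -= min_val
--
--     return modified
-- ===== SOURCE B (Python) =====
-- def _reduce_matrix_columns(matrix):
--     mins = matrix[0]
--     for row in matrix[1:]:
--         mins = [min(m, row[n]) for n, m in enumerate(mins)]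
--     result = []
--     for row in matrix:
--         new_row = list(row)
--         for n, m in enumerate(mins):
--             new_row[n] -= m
--         result.append(new_row)
--     return result
-- ===== Notes on version B (the rewrite author's own statement) =====
-- stated objective: alternative
-- what changed: B makes a single row-major pass folding the rows into a running elementwise-minimum vector and then one subtraction pass building fresh rows, instead of A's column-by-column min scan and in-place subtraction on a deepcopy; Pre_ excludes only the inputs where A raises IndexError (empty matrix, or a row shorter than row 0).
import Mathlib
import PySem

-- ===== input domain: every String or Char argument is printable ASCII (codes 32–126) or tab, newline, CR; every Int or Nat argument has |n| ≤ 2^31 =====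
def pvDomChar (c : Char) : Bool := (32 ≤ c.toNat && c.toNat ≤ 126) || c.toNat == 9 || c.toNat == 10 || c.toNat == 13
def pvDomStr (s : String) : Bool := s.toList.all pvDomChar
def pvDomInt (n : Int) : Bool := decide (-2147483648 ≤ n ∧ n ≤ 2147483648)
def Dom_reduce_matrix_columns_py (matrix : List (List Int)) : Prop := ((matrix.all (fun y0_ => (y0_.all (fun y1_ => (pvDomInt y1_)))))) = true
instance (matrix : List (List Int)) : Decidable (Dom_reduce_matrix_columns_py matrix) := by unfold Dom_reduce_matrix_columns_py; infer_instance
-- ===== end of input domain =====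

-- B replaces A's column-by-column min scans and in-place subtraction with a single row-major
-- running elementwise-min fold, then one subtraction pass building fresh rows (alternative traversal).

-- ===== PORT A =====
-- literal port of A: deepcopy + for n in range(n_len): min of column n, then subtract it in place from every row
def reduce_matrix_columns_py (matrix : List (List Int)) : List (List Int) :=
  let m_len := matrix.length
  let n_len := (matrix.headD []).length   -- len(matrix[0]); Python raises IndexError on [], excluded by Pre_
  (List.range n_len).foldl
    (fun modified (n : Nat) =>
      let min_val := (PySem.List.min? (modified.map (fun row => PySem.List.pyGetD row (n : Int) 0)) (fun x => x)).getD 0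
      (List.range m_len).foldl
        (fun md m => md.modify m (fun row => row.modify n (fun x => x - min_val)))
        modified)
    matrix

-- ===== PORT B =====
-- literal port of B: fold the rows into a running elementwise-min vector, then subtract it into a copy of each row
def reduce_matrix_columns_py_alt (matrix : List (List Int)) : List (List Int) :=
  let mins := (matrix.drop 1).foldl
    (fun mins row => (PySem.List.enumerate mins 0).map
      (fun p => min p.2 (PySem.List.pyGetD row p.1 0)))   -- min(m, row[n]); row[n] raises on short rows, excluded by Pre_
    (matrix.headD [])   -- matrix[0]; Python raises IndexError on [], excluded by Pre_
  matrix.map (fun row =>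
    (PySem.List.enumerate mins 0).foldl
      (fun new_row p => new_row.modify p.1.toNat (fun x => x - p.2))
      row)

-- ===== PRECONDITION & SPEC =====
-- Pre_ excludes exactly the inputs where the Python A raises IndexError: the empty matrix
-- (matrix[0] fails) and matrices with a row shorter than row 0 (row[n] fails).
def Pre_reduce_matrix_columns_py (matrix : List (List Int)) : Prop :=
  matrix ≠ [] ∧ ∀ row ∈ matrix, (matrix.headD []).length ≤ row.length
instance (matrix : List (List Int)) : Decidable (Pre_reduce_matrix_columns_py matrix) := by
  unfold Pre_reduce_matrix_columns_py; infer_instance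
def pvWitness_reduce_matrix_columns_py : List (List Int) := [[3, 5], [1, 8]]

def Spec_reduce_matrix_columns_py (matrix : List (List Int)) (out : List (List Int)) : Prop := out = reduce_matrix_columns_py_alt matrix
instance (matrix : List (List Int)) (out : List (List Int)) : Decidable (Spec_reduce_matrix_columns_py matrix out) := by unfold Spec_reduce_matrix_columns_py; infer_instance

-- ===== CLAIM (what is proved, stated in full; the proofs are below) =====
def Claim_equal_reduce_matrix_columns_py : Prop := ∀ (matrix : List (List Int)), Dom_reduce_matrix_columns_py matrix → Pre_reduce_matrix_columns_py matrix → Spec_reduce_matrix_columns_py matrix (reduce_matrix_columns_py matrix)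

-- ===== LEMMAS AND PROOFS =====

-- minimum of column j of `matrix` (the value both passes compute for column j)
def pvColMin (matrix : List (List Int)) (j : Nat) : Int :=
  (PySem.List.min? (matrix.map (fun row => PySem.List.pyGetD row (j : Int) 0)) (fun x => x)).getD 0

lemma modify_append_cons {α : Type} (P : List α) (x : α) (rest : List α) (f : α → α) :
    ∀ (k : Nat), P.length = k → (P ++ x :: rest).modify k f = P ++ f x :: rest := by
  induction P with
  | nil => intro k hk; subst hk; simp
  | cons a t ih =>
    intro k hk
    subst hk
    simpa [List.modify] using ih t.length rfl

-- the inner `for m in range(m_len)` loop of A applies the row-update to every row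
lemma inner_foldl {α : Type} (f : α → α) :
    ∀ (L : Nat) (M : List α), L ≤ M.length →
      (List.range L).foldl (fun md m => md.modify m f) M = (M.take L).map f ++ M.drop L := by
  intro L
  induction L with
  | zero => intro M _; simp
  | succ L ih =>
    intro M hL
    rw [List.range_succ, List.foldl_append, ih M (by omega)]
    have hlt : L < M.length := by omega
    have hP : ((M.take L).map f).length = L := by
      simp [List.length_take]; omega
    rw [List.drop_eq_getElem_cons hlt]
    simp only [List.foldl_cons, List.foldl_nil]
    rw [modify_append_cons _ _ _ _ _ hP]
    rw [List.take_add_one, List.getElem?_eq_getElem hlt, List.map_append]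
    simp

-- a row after its first k columns have been reduced by `mins`
def pvRowF (mins : List Int) (k : Nat) (row : List Int) : List Int :=
  List.zipWith (fun x m => x - m) (row.take k) (mins.take k) ++ row.drop k

lemma col_of_rowF (mins : List Int) (k n_len : Nat) (row : List Int)
    (hk : k < n_len) (hm : mins.length = n_len) (hr : n_len ≤ row.length) :
    PySem.List.pyGetD (pvRowF mins k row) (k : Int) 0 = PySem.List.pyGetD row (k : Int) 0 := by
  have hpre : (List.zipWith (fun x m => x - m) (row.take k) (mins.take k)).length = k := by
    simp [List.length_zipWith, List.length_take]; omega
  simp only [pvRowF, PySem.List.pyGetD_natCast, List.getD_eq_getElem?_getD]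
  rw [List.getElem?_append_right (by omega), hpre]
  simp [List.getElem?_drop]

-- reducing column k of a row whose first k columns are already reduced
lemma pvRowF_step (mins : List Int) (k : Nat) (row : List Int)
    (hkm : k < mins.length) (hr : mins.length ≤ row.length) :
    (pvRowF mins k row).modify k (fun x => x - mins[k]) = pvRowF mins (k + 1) row := by
  have hkr : k < row.length := by omega
  have hpre : (List.zipWith (fun x m => x - m) (row.take k) (mins.take k)).length = k := by
    simp [List.length_zipWith, List.length_take]; omega
  unfold pvRowF
  rw [List.drop_eq_getElem_cons hkr, modify_append_cons _ _ _ _ _ hpre]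
  rw [List.take_add_one, List.take_add_one,
      List.getElem?_eq_getElem hkr, List.getElem?_eq_getElem hkm]
  simp only [Option.toList_some]
  rw [List.zipWith_append (by simp [List.length_take]; omega)]
  simp

-- main invariant for A: the column loop, run on the first k columns, is the row-wise map by pvRowF
lemma main_inv (matrix : List (List Int)) (n_len : Nat)
    (hn : n_len = (matrix.headD []).length)
    (hlen : ∀ row ∈ matrix, n_len ≤ row.length)
    (mins : List Int) (hmins : mins = (List.range n_len).map (pvColMin matrix)) :
    ∀ k ≤ n_len,
      (List.range k).foldl
        (fun modified (n : Nat) =>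
          let min_val := (PySem.List.min? (modified.map (fun row => PySem.List.pyGetD row (n : Int) 0)) (fun x => x)).getD 0
          (List.range matrix.length).foldl
            (fun md m => md.modify m (fun row => row.modify n (fun x => x - min_val)))
            modified)
        matrix
      = matrix.map (pvRowF mins k) := by
  have hmlen : mins.length = n_len := by simp [hmins]
  intro k
  induction k with
  | zero =>
    intro _
    have hid : pvRowF mins 0 = id := funext fun row => by simp [pvRowF]
    simp [hid]
  | succ k ih =>
    intro hk1
    have hk : k < n_len := by omega
    rw [List.range_succ, List.foldl_append, ih (by omega)]
    simp only [List.foldl_cons, List.foldl_nil]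
    have hcol : (PySem.List.min? ((matrix.map (pvRowF mins k)).map (fun row => PySem.List.pyGetD row (k : Int) 0)) (fun x => x)).getD 0
        = pvColMin matrix k := by
      unfold pvColMin
      rw [List.map_map]
      congr 2
      apply List.map_congr_left
      intro row hrow
      exact col_of_rowF mins k n_len row hk hmlen (hlen row hrow)
    rw [hcol]
    have hL : matrix.length = (matrix.map (pvRowF mins k)).length := by simp
    rw [hL, inner_foldl _ _ _ (le_refl _)]
    simp only [List.take_length, List.drop_length, List.append_nil, List.map_map]
    apply List.map_congr_left
    intro row hrow
    have hmk : mins[k]'(by omega) = pvColMin matrix k := by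
      subst hmins; simp
    rw [show (fun x => x - pvColMin matrix k) = (fun x => x - mins[k]'(by omega)) from by rw [hmk]]
    exact pvRowF_step mins k row (by omega) (by rw [hmlen]; exact hlen row hrow)

-- a list is the range-map of its own entries
lemma getD_range_map_self (l : List Int) :
    (List.range l.length).map (fun j => l.getD j 0) = l := by
  apply List.ext_getElem (by simp)
  intro j h1 h2
  simp [List.getElem?_eq_getElem h2]

-- B's running elementwise-min fold computes, at each index, the foldl-min of that column
lemma mins_fold (n_len : Nat) :
    ∀ (rows : List (List Int)) (acc : List Int), acc.length = n_len →
      (∀ r ∈ rows, n_len ≤ r.length) →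
      rows.foldl
        (fun mins row => (PySem.List.enumerate mins 0).map
          (fun p => min p.2 (PySem.List.pyGetD row p.1 0)))
        acc
        = (List.range n_len).map
            (fun j => (rows.map (fun r => r.getD j 0)).foldl min (acc.getD j 0)) := by
  intro rows
  induction rows with
  | nil =>
    intro acc hacc _
    subst hacc
    simp only [List.foldl_nil, List.map_nil]
    exact (getD_range_map_self acc).symm
  | cons r rows ih =>
    intro acc hacc hlen
    have hzlen : ((PySem.List.enumerate acc 0).map
        (fun p => min p.2 (PySem.List.pyGetD r p.1 0))).length = n_len := by
      simp [PySem.List.length_enumerate, hacc]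
    rw [List.foldl_cons, ih _ hzlen (fun x hx => hlen x (by simp [hx]))]
    apply List.map_congr_left
    intro j hj
    have hjn : j < n_len := List.mem_range.mp hj
    have hja : j < acc.length := by omega
    have hjr : j < r.length := by have := hlen r (by simp); omega
    have hz : ((PySem.List.enumerate acc 0).map
        (fun p => min p.2 (PySem.List.pyGetD r p.1 0))).getD j 0
        = min (acc.getD j 0) (r.getD j 0) := by
      rw [List.getD_eq_getElem _ _ (by omega : j < _), List.getD_eq_getElem _ _ hja,
          List.getD_eq_getElem _ _ hjr]
      rw [List.getElem_map]
      rw [PySem.List.getElem_enumerate]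
      simp [PySem.List.pyGetD_natCast, List.getElem?_eq_getElem hjr]
    rw [hz]
    simp

-- the column-min vector A computes column by column is B's fold
lemma mins_eq (r0 : List Int) (rest : List (List Int))
    (hlen : ∀ row ∈ rest, r0.length ≤ row.length) :
    rest.foldl
      (fun mins row => (PySem.List.enumerate mins 0).map
        (fun p => min p.2 (PySem.List.pyGetD row p.1 0)))
      r0
      = (List.range r0.length).map (pvColMin (r0 :: rest)) := by
  rw [mins_fold r0.length rest r0 rfl hlen]
  apply List.map_congr_left
  intro j hj
  have hjr : j < r0.length := List.mem_range.mp hj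
  unfold pvColMin
  rw [List.map_cons, PySem.List.min?_id_cons]
  simp [PySem.List.pyGetD_natCast]

-- B's enumerate loop over the first k minima reduces the first k columns of a row
lemma enum_foldl (mins row : List Int) (hr : mins.length ≤ row.length) :
    ∀ k ≤ mins.length,
      (PySem.List.enumerate (mins.take k) 0).foldl
        (fun new_row p => new_row.modify p.1.toNat (fun x => x - p.2)) row
      = pvRowF mins k row := by
  intro k
  induction k with
  | zero =>
    intro _
    simp [pvRowF]
  | succ k ih =>
    intro hk1
    have hk : k < mins.length := by omega
    rw [List.take_add_one, List.getElem?_eq_getElem hk]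
    simp only [Option.toList_some]
    rw [PySem.List.enumerate_append, List.foldl_append, ih (by omega)]
    have htk : (mins.take k).length = k := by simp [List.length_take]; omega
    rw [htk, PySem.List.enumerate_cons]
    simp only [PySem.List.enumerate_nil, List.foldl_cons, List.foldl_nil]
    have ht : ((0 : Int) + (k : Int)).toNat = k := by omega
    rw [ht]
    exact pvRowF_step mins k row hk hr

-- ===== VERDICT (by name: the statement is the Claim_ definition above) =====
theorem reduce_matrix_columns_py_spec : Claim_equal_reduce_matrix_columns_py := by
  intro matrix _ hpre
  obtain ⟨hne, hlen⟩ := hpre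
  unfold Spec_reduce_matrix_columns_py reduce_matrix_columns_py reduce_matrix_columns_py_alt
  obtain ⟨r0, rest, rfl⟩ : ∃ r0 rest, matrix = r0 :: rest :=
    ⟨matrix.headD [], matrix.tail, by cases matrix with | nil => exact absurd rfl hne | cons a t => rfl⟩
  simp only [List.headD_cons] at hlen ⊢
  have hA := main_inv (r0 :: rest) r0.length (by simp) hlen
    ((List.range r0.length).map (pvColMin (r0 :: rest))) rfl r0.length (le_refl _)
  rw [hA]
  rw [show (r0 :: rest).drop 1 = rest from rfl]
  rw [mins_eq r0 rest (fun row hrow => hlen row (by simp [hrow]))]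
  apply List.map_congr_left
  intro row hrow
  have hM : ((List.range r0.length).map (pvColMin (r0 :: rest))).length = r0.length := by simp
  have h := enum_foldl ((List.range r0.length).map (pvColMin (r0 :: rest))) row
    (by rw [hM]; exact hlen row hrow) _ (le_refl _)
  rw [List.take_length] at h
  rw [h, hM]
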